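-- pv_equiv track=rewrite | github.com/Pescano/Advent-Of-Code | 2024/Day-14/Solution2.py | get_easter_egg_time
-- ===== SOURCE A (Python) =====
-- def get_future_positions(robots, time_steps, width, height):
-- 	future_positions = []
-- 	for (px, py), (vx, vy) in robots:
-- 		nx = (px + vx * time_steps) % width
-- 		ny = (py + vy * time_steps) % height
-- 		future_positions.append((nx, ny))
-- 	return future_positions
--
-- def get_easter_egg_time(robots, width, height):
-- 	easter_egg_time = 0
-- 	while True:
-- 		future_positions = get_future_positions(robots, easter_egg_time, width, height)
-- 		distinct_positions = set(future_positions)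
-- 		if len(distinct_positions) == len(future_positions):
-- 			break
-- 		easter_egg_time += 1
-- 	return easter_egg_time, future_positions
-- ===== SOURCE B (Python) =====
-- def get_easter_egg_time(robots, width, height):
--     positions = [(px % width, py % height) for (px, py), _ in robots]
--     velocities = [v for _, v in robots]
--     time = 0
--     while len(set(positions)) != len(positions):
--         positions = [((x + vx) % width, (y + vy) % height)
--                      for (x, y), (vx, vy) in zip(positions, velocities)]
--         time += 1
--     return time, positions
-- ===== Notes on version B (the rewrite author's own statement) =====
-- stated objective: alternative
-- what changed: Instead of recomputing every position from scratch with the closed form (p+v*t)%dim at each candidate time, B maintains the current positions as running state (reduced once at t=0) and advances each by one velocity step modulo the grid per iteration.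
import Mathlib
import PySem

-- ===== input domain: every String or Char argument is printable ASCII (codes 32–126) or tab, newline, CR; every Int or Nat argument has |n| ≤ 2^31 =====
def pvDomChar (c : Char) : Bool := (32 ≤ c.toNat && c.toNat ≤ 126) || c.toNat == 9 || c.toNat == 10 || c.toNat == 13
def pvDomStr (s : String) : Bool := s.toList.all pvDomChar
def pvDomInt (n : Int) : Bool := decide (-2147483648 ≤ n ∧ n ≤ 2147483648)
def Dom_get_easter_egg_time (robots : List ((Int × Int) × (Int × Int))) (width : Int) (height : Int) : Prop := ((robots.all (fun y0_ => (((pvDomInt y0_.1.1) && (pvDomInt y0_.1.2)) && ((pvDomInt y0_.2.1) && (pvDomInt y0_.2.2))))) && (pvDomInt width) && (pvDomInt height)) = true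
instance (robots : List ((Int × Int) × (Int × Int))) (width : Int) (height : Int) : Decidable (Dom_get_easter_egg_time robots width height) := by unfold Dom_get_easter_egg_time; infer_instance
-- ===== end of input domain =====

-- ===== PORT A =====
-- B replaces A's per-step closed-form recompute (p+v*t)%dim with incremental running
-- positions advanced by one velocity step modulo the grid per iteration (same cost class).
-- Both loops are totalized with fuel |width*height| (a period of the configuration);
-- Pre_ guarantees the answer is found within it.
def get_future_positions (robots : List ((Int × Int) × (Int × Int))) (time_steps : Int) (width : Int) (height : Int) : List (Int × Int) :=
  robots.foldl (fun acc r =>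
    acc ++ [(PySem.Int.mod (r.1.1 + r.2.1 * time_steps) width,
             PySem.Int.mod (r.1.2 + r.2.2 * time_steps) height)]) []

def pvLoopA (robots : List ((Int × Int) × (Int × Int))) (width : Int) (height : Int) : Nat → Int → Int × (List (Int × Int))
  | 0, t => (t, get_future_positions robots t width height)
  | fuel+1, t =>
    let fp := get_future_positions robots t width height
    if (PySem.Set.ofList fp).length = fp.length then (t, fp)
    else pvLoopA robots width height fuel (t+1)

def get_easter_egg_time (robots : List ((Int × Int) × (Int × Int))) (width : Int) (height : Int) : Int × (List (Int × Int)) :=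
  pvLoopA robots width height (width * height).natAbs 0

-- ===== PORT B =====
def pvAdvance (width : Int) (height : Int) (pos : List (Int × Int)) (vels : List (Int × Int)) : List (Int × Int) :=
  (pos.zip vels).map (fun pv =>
    (PySem.Int.mod (pv.1.1 + pv.2.1) width, PySem.Int.mod (pv.1.2 + pv.2.2) height))

def pvLoopB (width : Int) (height : Int) (vels : List (Int × Int)) : Nat → Int → List (Int × Int) → Int × (List (Int × Int))
  | 0, t, pos => (t, pos)
  | fuel+1, t, pos =>
    if (PySem.Set.ofList pos).length = pos.length then (t, pos)
    else pvLoopB width height vels fuel (t+1) (pvAdvance width height pos vels)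

def get_easter_egg_time_alt (robots : List ((Int × Int) × (Int × Int))) (width : Int) (height : Int) : Int × (List (Int × Int)) :=
  pvLoopB width height (robots.map (fun r => r.2)) (width * height).natAbs 0
    (robots.map (fun r => (PySem.Int.mod r.1.1 width, PySem.Int.mod r.1.2 height)))

-- ===== PRECONDITION & SPEC =====
-- the configuration at time t (closed form), used only to state Pre_
def pvPosAt (robots : List ((Int × Int) × (Int × Int))) (width : Int) (height : Int) (t : Int) : List (Int × Int) :=
  robots.map (fun r => (PySem.Int.mod (r.1.1 + r.2.1 * t) width,
                        PySem.Int.mod (r.1.2 + r.2.2 * t) height))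

-- Pre_ excludes zero width/height (Python A raises ZeroDivisionError in the first modulo) and the
-- inputs on which the robots never occupy pairwise-distinct positions, where Python A loops forever;
-- the configuration is periodic with period |width*height|, so the bounded search is exhaustive.
def Pre_get_easter_egg_time (robots : List ((Int × Int) × (Int × Int))) (width : Int) (height : Int) : Prop :=
  width ≠ 0 ∧ height ≠ 0 ∧ ∃ t : Nat, t < (width * height).natAbs ∧ (pvPosAt robots width height (t : Int)).Nodup

-- helpers and lemmas for the Decidable instance of Pre_ (a linear-stack search up from t = 0,
-- with a pairwise pre-check catching inputs where two robots coincide at every time)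
lemma pvModCongr (a c b : Int) (hb : b ≠ 0) (hd : b ∣ a - c) : PySem.Int.mod a b = PySem.Int.mod c b := by
  have ha := PySem.Int.floordiv_mul_add_mod a b
  have hc := PySem.Int.floordiv_mul_add_mod c b
  have hdvd : b ∣ (PySem.Int.mod a b - PySem.Int.mod c b) := by
    have he : PySem.Int.mod a b - PySem.Int.mod c b =
        (a - c) - (PySem.Int.floordiv a b - PySem.Int.floordiv c b) * b := by linarith
    rw [he]
    exact dvd_sub hd (dvd_mul_left b _)
  have habs : |PySem.Int.mod a b - PySem.Int.mod c b| < |b| := by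
    rcases lt_or_gt_of_ne hb with hneg | hpos
    · have h1 := PySem.Int.mod_neg_bounds a hneg
      have h2 := PySem.Int.mod_neg_bounds c hneg
      rw [abs_of_neg hneg]
      rcases abs_cases (PySem.Int.mod a b - PySem.Int.mod c b) with ⟨he, _⟩ | ⟨he, _⟩ <;> omega
    · have h1 := PySem.Int.mod_nonneg a hpos
      have h2 := PySem.Int.mod_lt a hpos
      have h3 := PySem.Int.mod_nonneg c hpos
      have h4 := PySem.Int.mod_lt c hpos
      rw [abs_of_pos hpos]
      rcases abs_cases (PySem.Int.mod a b - PySem.Int.mod c b) with ⟨he, _⟩ | ⟨he, _⟩ <;> omega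
  have := Int.eq_zero_of_abs_lt_dvd ((abs_dvd b _).mpr hdvd) habs
  omega

def pvStuckPair (width : Int) (height : Int) (r s : (Int × Int) × (Int × Int)) : Bool :=
  PySem.Int.mod (r.1.1 - s.1.1) width == 0 && PySem.Int.mod (r.2.1 - s.2.1) width == 0 &&
  PySem.Int.mod (r.1.2 - s.1.2) height == 0 && PySem.Int.mod (r.2.2 - s.2.2) height == 0

def pvHasStuckPair (width : Int) (height : Int) : List ((Int × Int) × (Int × Int)) → Bool
  | [] => false
  | r :: rs => rs.any (pvStuckPair width height r) || pvHasStuckPair width height rs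

def pvSearch (robots : List ((Int × Int) × (Int × Int))) (width : Int) (height : Int) : Nat → Nat → Bool
  | 0, _ => false
  | fuel+1, t => decide (pvPosAt robots width height (t : Int)).Nodup || pvSearch robots width height fuel (t+1)

lemma pvStuckPair_eq (width height : Int) (hw : width ≠ 0) (hh : height ≠ 0)
    (r s : (Int × Int) × (Int × Int)) (hp : pvStuckPair width height r s = true) (t : Int) :
    (PySem.Int.mod (r.1.1 + r.2.1 * t) width, PySem.Int.mod (r.1.2 + r.2.2 * t) height) =
    (PySem.Int.mod (s.1.1 + s.2.1 * t) width, PySem.Int.mod (s.1.2 + s.2.2 * t) height) := by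
  simp only [pvStuckPair, Bool.and_eq_true, beq_iff_eq] at hp
  obtain ⟨⟨⟨h1, h2⟩, h3⟩, h4⟩ := hp
  rw [PySem.Int.mod_eq_zero_iff_dvd] at h1 h2 h3 h4
  have hx : width ∣ (r.1.1 + r.2.1 * t) - (s.1.1 + s.2.1 * t) := by
    have : (r.1.1 + r.2.1 * t) - (s.1.1 + s.2.1 * t) = (r.1.1 - s.1.1) + (r.2.1 - s.2.1) * t := by ring
    rw [this]; exact dvd_add h1 (Dvd.dvd.mul_right h2 t)
  have hy : height ∣ (r.1.2 + r.2.2 * t) - (s.1.2 + s.2.2 * t) := by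
    have : (r.1.2 + r.2.2 * t) - (s.1.2 + s.2.2 * t) = (r.1.2 - s.1.2) + (r.2.2 - s.2.2) * t := by ring
    rw [this]; exact dvd_add h3 (Dvd.dvd.mul_right h4 t)
  exact Prod.ext (pvModCongr _ _ _ hw hx) (pvModCongr _ _ _ hh hy)

lemma pvStuck_not_nodup (robots : List ((Int × Int) × (Int × Int))) (width height : Int)
    (hw : width ≠ 0) (hh : height ≠ 0) (hs : pvHasStuckPair width height robots = true) :
    ∀ t : Int, ¬ (pvPosAt robots width height t).Nodup := by
  intro t hn
  induction robots with
  | nil => simp [pvHasStuckPair] at hs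
  | cons r rs ih =>
    simp only [pvPosAt, List.map_cons, List.nodup_cons] at hn
    rw [pvHasStuckPair, Bool.or_eq_true] at hs
    rcases hs with hs | hs
    · obtain ⟨s, hmem, hp⟩ := (List.any_eq_true.mp hs)
      exact hn.1 (by
        rw [pvStuckPair_eq width height hw hh r s hp t]
        exact List.mem_map_of_mem hmem)
    · exact ih hs hn.2

lemma pvSearch_iff (robots : List ((Int × Int) × (Int × Int))) (width height : Int) :
    ∀ (fuel t : Nat), pvSearch robots width height fuel t = true ↔
      ∃ k : Nat, k < fuel ∧ (pvPosAt robots width height ((t + k : Nat) : Int)).Nodup := by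
  intro fuel
  induction fuel with
  | zero => intro t; simp [pvSearch]
  | succ n ih =>
    intro t
    rw [pvSearch, Bool.or_eq_true, decide_eq_true_iff, ih (t+1)]
    constructor
    · rintro (h | ⟨k, hk, h⟩)
      · exact ⟨0, by omega, by simpa using h⟩
      · exact ⟨k + 1, by omega, by rw [show t + 1 + k = t + (k+1) by omega] at h; exact h⟩
    · rintro ⟨k, hk, h⟩
      rcases Nat.eq_zero_or_pos k with rfl | hkpos
      · exact Or.inl (by simpa using h)
      · exact Or.inr ⟨k - 1, by omega, by rw [show t + 1 + (k-1) = t + k by omega]; exact h⟩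

instance (robots : List ((Int × Int) × (Int × Int))) (width : Int) (height : Int) : Decidable (Pre_get_easter_egg_time robots width height) :=
  if hw : width = 0 then isFalse (fun h => h.1 hw)
  else if hh : height = 0 then isFalse (fun h => h.2.1 hh)
  else if hs : pvHasStuckPair width height robots = true then
    isFalse (fun h => by
      obtain ⟨_, _, t, _, hn⟩ := h
      exact pvStuck_not_nodup robots width height hw hh hs (t : Int) hn)
  else
    decidable_of_iff (pvSearch robots width height (width * height).natAbs 0 = true) (by
      rw [pvSearch_iff]
      unfold Pre_get_easter_egg_time
      constructor
      · rintro ⟨k, hk, hn⟩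
        exact ⟨hw, hh, k, hk, by simpa using hn⟩
      · rintro ⟨_, _, k, hk, hn⟩
        exact ⟨k, hk, by simpa using hn⟩)

def pvWitness_get_easter_egg_time : (List ((Int × Int) × (Int × Int))) × Int × Int := ([((0, 0), (1, 1))], 3, 3)

def Spec_get_easter_egg_time (robots : List ((Int × Int) × (Int × Int))) (width : Int) (height : Int) (out : Int × (List (Int × Int))) : Prop := out = get_easter_egg_time_alt robots width height
instance (robots : List ((Int × Int) × (Int × Int))) (width : Int) (height : Int) (out : Int × (List (Int × Int))) : Decidable (Spec_get_easter_egg_time robots width height out) := by unfold Spec_get_easter_egg_time; infer_instance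

-- ===== CLAIM (what is proved, stated in full; the proofs are below) =====
def Claim_equal_get_easter_egg_time : Prop := ∀ (robots : List ((Int × Int) × (Int × Int))) (width : Int) (height : Int), Dom_get_easter_egg_time robots width height → Pre_get_easter_egg_time robots width height → Spec_get_easter_egg_time robots width height (get_easter_egg_time robots width height)

-- ===== LEMMAS AND PROOFS =====
lemma pvGfp_eq_posAt (robots : List ((Int × Int) × (Int × Int))) (width height t : Int) :
    get_future_positions robots t width height = pvPosAt robots width height t := by
  unfold get_future_positions pvPosAt
  simpa using PySem.List.foldl_append_singleton_eq_map
    (fun r : (Int × Int) × (Int × Int) =>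
      (PySem.Int.mod (r.1.1 + r.2.1 * t) width, PySem.Int.mod (r.1.2 + r.2.2 * t) height)) robots []

lemma pvModShift (x v b : Int) (hb : b ≠ 0) :
    PySem.Int.mod (PySem.Int.mod x b + v) b = PySem.Int.mod (x + v) b := by
  apply pvModCongr _ _ _ hb
  have h := PySem.Int.floordiv_mul_add_mod x b
  have : PySem.Int.mod x b + v - (x + v) = -(PySem.Int.floordiv x b) * b := by linarith
  rw [this]; exact dvd_mul_left b _

lemma pvAdvance_posAt (robots : List ((Int × Int) × (Int × Int))) (width height : Int)
    (hw : width ≠ 0) (hh : height ≠ 0) (t : Int) :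
    pvAdvance width height (pvPosAt robots width height t) (robots.map (fun r => r.2)) =
      pvPosAt robots width height (t + 1) := by
  induction robots with
  | nil => simp [pvAdvance, pvPosAt]
  | cons r rs ih =>
    simp only [pvPosAt, pvAdvance, List.map_cons, List.zip_cons_cons, List.map_cons] at *
    refine List.cons_eq_cons.mpr ⟨?_, ih⟩
    rw [pvModShift _ _ _ hw, pvModShift _ _ _ hh]
    congr 1 <;> ring_nf

lemma pvLoop_eq (robots : List ((Int × Int) × (Int × Int))) (width height : Int)
    (hw : width ≠ 0) (hh : height ≠ 0) :
    ∀ (fuel : Nat) (t : Int),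
      pvLoopA robots width height fuel t =
        pvLoopB width height (robots.map (fun r => r.2)) fuel t (pvPosAt robots width height t) := by
  intro fuel
  induction fuel with
  | zero => intro t; simp [pvLoopA, pvLoopB, pvGfp_eq_posAt]
  | succ n ih =>
    intro t
    rw [pvLoopA, pvLoopB]
    simp only [pvGfp_eq_posAt]
    split
    · rfl
    · rw [pvAdvance_posAt robots width height hw hh t]
      exact ih (t + 1)

-- ===== VERDICT (by name: the statement is the Claim_ definition above) =====
theorem get_easter_egg_time_spec : Claim_equal_get_easter_egg_time := by
  intro robots width height _ hpre
  obtain ⟨hw, hh, -⟩ := hpre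
  unfold Spec_get_easter_egg_time get_easter_egg_time get_easter_egg_time_alt
  have h0 : robots.map (fun r => (PySem.Int.mod r.1.1 width, PySem.Int.mod r.1.2 height)) =
      pvPosAt robots width height 0 := by
    unfold pvPosAt; simp
  rw [h0]
  exact pvLoop_eq robots width height hw hh (width * height).natAbs 0
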